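-- pv_equiv track=rewrite | github.com/dpetrovych/nonopy | nonopy/bline/combinations.py | rec_block_tigth_positions
-- ===== SOURCE A (Python) =====
-- MIN_BLOCK_SPACE = 1
--
-- def rec_block_tigth_positions(t):
--     head, tail = t[0], t[1:]
--     if not tail:
--         return [(head, head)]
--
--     tail_pos = rec_block_tigth_positions(tail)
--     last_pos = tail_pos[-1][1]
--     tail_pos.append((head, last_pos + head + MIN_BLOCK_SPACE))
--     return tail_pos
-- ===== SOURCE B (Python) =====
-- MIN_BLOCK_SPACE = 1
--
-- def rec_block_tigth_positions(t):
--     # Iterative accumulation over the blocks in reverse (raises IndexError on empty t, like A).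
--     pos = t[-1]
--     res = [(pos, pos)]
--     for block in reversed(t[:-1]):
--         pos += block + MIN_BLOCK_SPACE
--         res.append((block, pos))
--     return res
-- ===== Notes on version B (the rewrite author's own statement) =====
-- stated objective: faster
-- what changed: Replaces the linear recursion (which re-slices t[1:] at every level and re-reads the growing list's last element) with a single iterative pass over the blocks in reverse carrying the running position.
import Mathlib
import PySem

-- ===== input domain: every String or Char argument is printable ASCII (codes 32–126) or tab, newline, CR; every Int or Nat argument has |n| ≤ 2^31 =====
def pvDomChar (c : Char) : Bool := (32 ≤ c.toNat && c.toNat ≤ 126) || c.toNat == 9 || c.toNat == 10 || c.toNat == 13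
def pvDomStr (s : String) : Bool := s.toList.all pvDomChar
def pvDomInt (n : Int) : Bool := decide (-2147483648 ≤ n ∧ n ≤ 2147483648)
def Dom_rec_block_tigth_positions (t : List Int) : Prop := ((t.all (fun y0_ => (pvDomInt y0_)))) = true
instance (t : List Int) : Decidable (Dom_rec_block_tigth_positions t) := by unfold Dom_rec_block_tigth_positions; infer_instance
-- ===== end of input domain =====

-- B replaces A's linear recursion by one iterative reverse pass carrying the running position.
-- Return-value equivalence on nonempty t; on [] both Pythons raise IndexError (excluded by Pre_).

-- ===== PORT A =====
-- A's recursion: head, tail = t[0], t[1:]; base case when tail is empty; otherwise recurse,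
-- read tail_pos[-1][1] (tail_pos is provably nonempty, so getLast? is exact here) and append.
def rec_block_tigth_positions (t : List Int) : List (Int × Int) :=
  match t with
  | [] => []   -- Python raises IndexError here; excluded by Pre_
  | head :: tail =>
    if tail = [] then [(head, head)]
    else
      let tail_pos := rec_block_tigth_positions tail
      let last_pos := ((tail_pos.getLast?).map Prod.snd).getD 0
      tail_pos ++ [(head, last_pos + head + 1)]

-- ===== PORT B =====
-- B's loop body: state is (res, pos); one step per block of reversed t[:-1].
def pvBStep (st : List (Int × Int) × Int) (block : Int) : List (Int × Int) × Int :=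
  let pos := st.2 + block + 1
  (st.1 ++ [(block, pos)], pos)

def rec_block_tigth_positions_alt (t : List Int) : List (Int × Int) :=
  match t.getLast? with
  | none => []   -- Python raises IndexError on t[-1]; excluded by Pre_
  | some lastEl =>
    (List.foldl pvBStep ([(lastEl, lastEl)], lastEl) t.dropLast.reverse).1

-- ===== PRECONDITION & SPEC =====
-- Pre_ excludes only the empty list, on which both Pythons raise IndexError.
def Pre_rec_block_tigth_positions (t : List Int) : Prop := t ≠ []
instance (t : List Int) : Decidable (Pre_rec_block_tigth_positions t) := by
  unfold Pre_rec_block_tigth_positions; infer_instance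

def pvWitness_rec_block_tigth_positions : List Int := [3, 1, 2]

def Spec_rec_block_tigth_positions (t : List Int) (out : List (Int × Int)) : Prop := out = rec_block_tigth_positions_alt t
instance (t : List Int) (out : List (Int × Int)) : Decidable (Spec_rec_block_tigth_positions t out) := by unfold Spec_rec_block_tigth_positions; infer_instance

-- ===== CLAIM (what is proved, stated in full; the proofs are below) =====
def Claim_equal_rec_block_tigth_positions : Prop := ∀ (t : List Int), Dom_rec_block_tigth_positions t → Pre_rec_block_tigth_positions t → Spec_rec_block_tigth_positions t (rec_block_tigth_positions t)

-- ===== LEMMAS AND PROOFS =====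

theorem pvA_ne_nil (t : List Int) (h : t ≠ []) : rec_block_tigth_positions t ≠ [] := by
  cases t with
  | nil => exact absurd rfl h
  | cons a tl =>
    unfold rec_block_tigth_positions
    split <;> simp

-- B's fold over t.dropLast.reverse reproduces A's result and carries A's last position.
theorem pvFold_eq (t : List Int) (h : t ≠ []) :
    List.foldl pvBStep ((t.getLast?.getD 0, t.getLast?.getD 0) :: [], t.getLast?.getD 0)
        t.dropLast.reverse
      = (rec_block_tigth_positions t,
         (((rec_block_tigth_positions t).getLast?).map Prod.snd).getD 0) := by
  induction t with
  | nil => exact absurd rfl h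
  | cons a tl ih =>
    cases tl with
    | nil => simp [rec_block_tigth_positions]
    | cons b tl' =>
      have htl : (b :: tl') ≠ [] := by simp
      have hlast : (a :: b :: tl').getLast? = (b :: tl').getLast? := by
        simp [List.getLast?_cons_cons]
      have hdrop : (a :: b :: tl').dropLast = a :: (b :: tl').dropLast := by
        simp [List.dropLast_cons_of_ne_nil htl]
      rw [hlast, hdrop, List.reverse_cons, List.foldl_append, ih htl]
      have hAne := pvA_ne_nil (b :: tl') htl
      have hA : rec_block_tigth_positions (a :: b :: tl')
          = rec_block_tigth_positions (b :: tl')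
            ++ [(a, ((((rec_block_tigth_positions (b :: tl')).getLast?).map Prod.snd).getD 0) + a + 1)] := by
        conv_lhs => rw [rec_block_tigth_positions]
        simp
      rw [hA]
      simp [pvBStep, List.getLast?_append]

-- ===== VERDICT (by name: the statement is the Claim_ definition above) =====
theorem rec_block_tigth_positions_spec : Claim_equal_rec_block_tigth_positions := by
  intro t _ hpre
  unfold Spec_rec_block_tigth_positions rec_block_tigth_positions_alt
  have hg : t.getLast? = some (t.getLast?.getD 0) := by
    cases hx : t.getLast? with
    | none => exact absurd (List.getLast?_eq_none_iff.mp hx) hpre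
    | some v => simp
  rw [hg]
  simp only []
  have := pvFold_eq t hpre
  rw [this]
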